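-- pv_equiv track=rewrite | github.com/GateStainer/LstmLgBackend | LstmLgBackend/SCLSTM4Integrate/data_reader.py | load_slot_value_to_id
-- ===== SOURCE A (Python) =====
-- def split(line):
--     ret = []
--     line = line.strip()
--     if len(line) == 0:
--         return ret
--     comma = [-1]
--     in_quotation = False
--     cnt = 0
--     while cnt < len(line):
--         ch = line[cnt]
--         if ch == '\"' and cnt > 0 and line[cnt - 1] == '=' \
--             or ch == '\"' and cnt + 1 < len(line) and line[cnt + 1] == ',' \
--             or ch == '\"' and cnt + 1 == len(line):
--             in_quotation = not in_quotation
--         if ch == ',' and in_quotation == False: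
--             comma.append(cnt)
--         cnt += 1
--     comma.append(len(line))
--     cnt = 0
--     while cnt + 1 < len(comma):
--         part = line[comma[cnt] + 1: comma[cnt + 1]].strip()
--         if len(part) > 0:
--             ret.append(part)
--         cnt += 1
--     return ret
--
-- def load_slot_value_to_id(lines):
--     svpair_all = {}
--     slot_all = {}
--     cnt = 0
--     while cnt < len(lines):
--         line = lines[cnt].strip()
--         pairs = split(line)
--         j = 0
--         slot_in_one_sent = {}
--         while j < len(pairs):
--             if len(pairs[j].strip()) == 0:
--                 j += 1
--                 continue
--             slot = '{' + pairs[j].split('=')[0].strip() + '}'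
--             idx = pairs[j].index('=')
--             value = pairs[j][idx + 1:].strip()
--             value = value.replace('\"', '')
--             if len(value.strip()) == 0:
--                 j += 1
--                 continue
--             slot_all[slot] = 1
--             if slot.find('(@C)') != -1:
--                 #sv = pairs[j].lower().replace('\"', '').strip()
--                 sv = slot + '=' + value
--             else:
--                 if slot not in slot_in_one_sent:
--                     sv = slot + '=' + '_1'
--                     slot_in_one_sent[slot] = 1
--                 else:
--                     sv = slot + '=' + '_' + str(slot_in_one_sent[slot] + 1)
--                     slot_in_one_sent[slot] += 1
--
--             if sv not in svpair_all:
--                 dic_size = len(svpair_all)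
--                 svpair_all[sv] = dic_size
--             j += 1
--         cnt += 1
--
--     return slot_all, svpair_all, len(svpair_all)
-- ===== SOURCE B (Python) =====
-- # B: single streaming tokenizer pass (in_quotation + buffer) instead of A's two-phase
-- # comma-index collection + slicing; per-token partition('=') instead of split+index.
-- def _split(line):
--     line = line.strip()
--     n = len(line)
--     parts = []
--     buf = []
--     in_q = False
--     for i in range(n):
--         ch = line[i]
--         if ch == '"' and (i > 0 and line[i - 1] == '=' or i + 1 < n and line[i + 1] == ',' or i + 1 == n):
--             in_q = not in_q
--         if ch == ',' and not in_q:
--             part = ''.join(buf).strip()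
--             if part:
--                 parts.append(part)
--             buf = []
--         else:
--             buf.append(ch)
--     part = ''.join(buf).strip()
--     if part:
--         parts.append(part)
--     return parts
--
--
-- def load_slot_value_to_id(lines):
--     svpair_all = {}
--     slot_all = {}
--     for line in lines:
--         slot_in_one_sent = {}
--         for token in _split(line):
--             eq = token.index('=')
--             value = token[eq + 1:].strip().replace('"', '')
--             if not value.strip():
--                 continue
--             slot = '{' + token[:eq].strip() + '}'
--             slot_all[slot] = 1
--             if '(@C)' in slot:
--                 sv = slot + '=' + value
--             else:
--                 k = slot_in_one_sent.get(slot, 0) + 1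
--                 slot_in_one_sent[slot] = k
--                 sv = slot + '=_' + str(k)
--             if sv not in svpair_all:
--                 svpair_all[sv] = len(svpair_all)
--     return slot_all, svpair_all, len(svpair_all)
-- ===== Notes on version B (the rewrite author's own statement) =====
-- stated objective: alternative
-- what changed: Tokenization is one streaming pass (in_quotation toggle plus a current-token buffer flushed at unquoted commas) instead of A's two-phase comma-index collection followed by slicing between recorded indices, and each token is decomposed with partition('=') instead of split('=') plus index('='); the dict-building loop is a plain for loop with dict.get.
import Mathlib
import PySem

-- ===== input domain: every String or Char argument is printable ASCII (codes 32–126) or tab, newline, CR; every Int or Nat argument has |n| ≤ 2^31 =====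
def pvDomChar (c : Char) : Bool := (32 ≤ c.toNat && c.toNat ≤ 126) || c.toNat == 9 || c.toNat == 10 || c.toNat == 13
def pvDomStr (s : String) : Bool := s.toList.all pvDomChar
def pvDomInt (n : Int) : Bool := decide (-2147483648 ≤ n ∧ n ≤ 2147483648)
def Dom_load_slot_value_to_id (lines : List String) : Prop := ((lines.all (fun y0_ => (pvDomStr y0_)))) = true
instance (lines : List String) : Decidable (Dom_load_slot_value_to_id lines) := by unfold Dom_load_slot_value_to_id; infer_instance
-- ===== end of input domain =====

-- B re-tokenizes each line in ONE streaming pass (quote-toggle + token buffer) instead of A's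
-- two-phase comma-index collection followed by slicing, and splits each token with partition('=')
-- instead of split('=') + index('='); same return value (objective: alternative, no speed claim).

-- ===== PORT A =====
-- 'if sv not in svpair_all: svpair_all[sv] = len(svpair_all)'
def pvAddSv (svp : PySem.Dict String Int) (sv : String) : PySem.Dict String Int :=
  if svp.contains sv then svp else svp.insert sv (svp.size : Int)

-- A's split, phase 1: the while loop recording every unquoted comma index into `comma`
def pvCommaScanA (cs : List Char) (cnt : Nat) (inq : Bool) (acc : List Int) : List Int :=
  if _h : cnt < cs.length then
    let ch := cs.getD cnt ' '
    let inq' := if ch = '"' ∧ (0 < cnt ∧ cs.getD (cnt - 1) ' ' = '='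
                  ∨ cnt + 1 < cs.length ∧ cs.getD (cnt + 1) ' ' = ','
                  ∨ cnt + 1 = cs.length) then !inq else inq
    let acc' := if ch = ',' ∧ inq' = false then acc ++ [(cnt : Int)] else acc
    pvCommaScanA cs (cnt + 1) inq' acc'
  else acc
termination_by cs.length - cnt

-- A's split, phase 2: the while loop slicing between consecutive recorded indices
def pvPartScanA (cs : List Char) : List Int → List String → List String
  | c1 :: c2 :: rest, acc =>
    let part := PySem.Chars.strip (PySem.List.slice cs (some (c1 + 1)) (some c2))
    pvPartScanA cs (c2 :: rest) (if 0 < part.length then acc ++ [String.ofList part] else acc)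
  | _, acc => acc

def pvSplitA (line : String) : List String :=
  let cs := PySem.Chars.strip line.toList
  if cs.length = 0 then []
  else pvPartScanA cs (pvCommaScanA cs 0 false [-1] ++ [(cs.length : Int)]) []

-- A's inner while loop over `pairs` (slot_in_one_sent threaded as `sios`)
def pvInnerA : List String → PySem.Dict String Int → PySem.Dict String Int → PySem.Dict String Int →
    PySem.Dict String Int × PySem.Dict String Int
  | [], slotAll, svp, _ => (slotAll, svp)
  | t :: rest, slotAll, svp, sios =>
    let tc := t.toList
    if (PySem.Chars.strip tc).length = 0 then pvInnerA rest slotAll svp sios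
    else
      let slotC := '{' :: (PySem.Chars.strip ((PySem.Chars.splitOn tc ['=']).headD []) ++ ['}'])
      let idx := PySem.Chars.find tc ['=']
      if idx = -1 then pvInnerA rest slotAll svp sios
        -- Python's pairs[j].index('=') raises ValueError here; such inputs are outside Pre_
      else
        let value := PySem.Chars.replace (PySem.Chars.strip (PySem.List.slice tc (some (idx + 1)) none)) ['"'] []
        if (PySem.Chars.strip value).length = 0 then pvInnerA rest slotAll svp sios
        else
          let slot := String.ofList slotC
          let slotAll' := slotAll.insert slot 1
          if PySem.Chars.find slotC ['(', '@', 'C', ')'] ≠ -1 then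
            pvInnerA rest slotAll' (pvAddSv svp (String.ofList (slotC ++ '=' :: value))) sios
          else
            match sios.get? slot with
            | none =>
              pvInnerA rest slotAll' (pvAddSv svp (String.ofList (slotC ++ ['=', '_', '1']))) (sios.insert slot 1)
            | some v =>
              pvInnerA rest slotAll' (pvAddSv svp (String.ofList (slotC ++ '=' :: '_' :: PySem.Int.toChars (v + 1)))) (sios.insert slot (v + 1))

-- A's outer while loop over `lines`
def pvOuterA : List String → PySem.Dict String Int → PySem.Dict String Int →
    PySem.Dict String Int × PySem.Dict String Int
  | [], slotAll, svp => (slotAll, svp)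
  | l :: rest, slotAll, svp =>
    let r := pvInnerA (pvSplitA (PySem.Str.strip l)) slotAll svp PySem.Dict.empty
    pvOuterA rest r.1 r.2

def load_slot_value_to_id (lines : List String) : (List (String × Int)) × (List (String × Int)) × Int :=
  let r := pvOuterA lines PySem.Dict.empty PySem.Dict.empty
  (r.1.items, r.2.items, (r.2.size : Int))

-- ===== PORT B =====
-- B's streaming tokenizer: one pass, quote toggle + current-token buffer, flush on unquoted comma
def pvStreamScanB (cs : List Char) (cnt : Nat) (inq : Bool) (buf : List Char) (acc : List String) : List String :=
  if _h : cnt < cs.length then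
    let ch := cs.getD cnt ' '
    let inq' := if ch = '"' ∧ (0 < cnt ∧ cs.getD (cnt - 1) ' ' = '='
                  ∨ cnt + 1 < cs.length ∧ cs.getD (cnt + 1) ' ' = ','
                  ∨ cnt + 1 = cs.length) then !inq else inq
    if ch = ',' ∧ inq' = false then
      let part := PySem.Chars.strip buf
      pvStreamScanB cs (cnt + 1) inq' [] (if 0 < part.length then acc ++ [String.ofList part] else acc)
    else
      pvStreamScanB cs (cnt + 1) inq' (buf ++ [ch]) acc
  else
    let part := PySem.Chars.strip buf
    if 0 < part.length then acc ++ [String.ofList part] else acc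
termination_by cs.length - cnt

def pvSplitB (line : String) : List String :=
  pvStreamScanB (PySem.Chars.strip line.toList) 0 false [] []

-- 'if sv not in svpair_all: svpair_all[sv] = len(svpair_all)' (B's copy of the same snippet)
def pvAddSvB (svp : PySem.Dict String Int) (sv : String) : PySem.Dict String Int :=
  if svp.contains sv then svp else svp.insert sv (svp.size : Int)

-- B's inner for loop over the tokens of one line
def pvInnerB : List String → PySem.Dict String Int → PySem.Dict String Int → PySem.Dict String Int →
    PySem.Dict String Int × PySem.Dict String Int
  | [], slotAll, svp, _ => (slotAll, svp)
  | t :: rest, slotAll, svp, sios =>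
    let tc := t.toList
    let eq := PySem.Chars.find tc ['=']
    if eq = -1 then pvInnerB rest slotAll svp sios
      -- Python's token.index('=') raises ValueError here; such inputs are outside Pre_
    else
      let value := PySem.Chars.replace (PySem.Chars.strip (PySem.List.slice tc (some (eq + 1)) none)) ['"'] []
      if (PySem.Chars.strip value).length = 0 then pvInnerB rest slotAll svp sios
      else
        let slotC := '{' :: (PySem.Chars.strip (PySem.List.slice tc none (some eq)) ++ ['}'])
        let slot := String.ofList slotC
        let slotAll' := slotAll.insert slot 1
        if PySem.Chars.isIn ['(', '@', 'C', ')'] slotC then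
          pvInnerB rest slotAll' (pvAddSvB svp (String.ofList (slotC ++ '=' :: value))) sios
        else
          let k := sios.getD slot 0 + 1
          pvInnerB rest slotAll' (pvAddSvB svp (String.ofList (slotC ++ '=' :: '_' :: PySem.Int.toChars k))) (sios.insert slot k)

-- B's outer for loop over `lines`
def pvOuterB : List String → PySem.Dict String Int → PySem.Dict String Int →
    PySem.Dict String Int × PySem.Dict String Int
  | [], slotAll, svp => (slotAll, svp)
  | l :: rest, slotAll, svp =>
    let r := pvInnerB (pvSplitB l) slotAll svp PySem.Dict.empty
    pvOuterB rest r.1 r.2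

def load_slot_value_to_id_alt (lines : List String) : (List (String × Int)) × (List (String × Int)) × Int :=
  let r := pvOuterB lines PySem.Dict.empty PySem.Dict.empty
  (r.1.items, r.2.items, (r.2.size : Int))

-- ===== PRECONDITION & SPEC =====
-- Pre_ is exactly the domain on which A returns normally: in every line, each piece between
-- consecutive unquoted commas (a comma is unquoted iff it is preceded by an even number of
-- toggle quotes; a quote toggles iff it follows '=', precedes ',', or ends the line) must be
-- blank or contain '=' — otherwise A's pairs[j].index('=') raises ValueError.  Stated with
-- countP/filter/slice over the line, independently of either port.
def pvToggleQuote (cs : List Char) (j : Nat) : Bool :=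
  cs.getD j ' ' == '"' &&
    (decide (0 < j) && (cs.getD (j - 1) ' ' == '=')
      || decide (j + 1 < cs.length) && (cs.getD (j + 1) ' ' == ',')
      || decide (j + 1 = cs.length))

def pvUnquotedComma (cs : List Char) (i : Nat) : Bool :=
  cs.getD i ' ' == ',' && ((List.range i).countP (fun j => pvToggleQuote cs j)) % 2 == 0

def pvLineOk (line : String) : Bool :=
  let cs := PySem.Chars.strip line.toList
  let bs : List Int :=
    -1 :: (((List.range cs.length).filter (pvUnquotedComma cs)).map (fun i => (i : Int)) ++ [(cs.length : Int)])
  (List.range (bs.length - 1)).all (fun k =>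
    let piece := PySem.List.slice cs (some (bs.getD k 0 + 1)) (some (bs.getD (k + 1) 0))
    (PySem.Chars.strip piece).isEmpty || piece.contains '=')

def Pre_load_slot_value_to_id (lines : List String) : Prop :=
  ∀ line ∈ lines, pvLineOk line = true
instance (lines : List String) : Decidable (Pre_load_slot_value_to_id lines) := by
  unfold Pre_load_slot_value_to_id; infer_instance

def pvWitness_load_slot_value_to_id : List String := ["name=x, type=\"b\"", "", "  a = 1 , a=2"]

def Spec_load_slot_value_to_id (lines : List String) (out : (List (String × Int)) × (List (String × Int)) × Int) : Prop := out = load_slot_value_to_id_alt lines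
instance (lines : List String) (out : (List (String × Int)) × (List (String × Int)) × Int) : Decidable (Spec_load_slot_value_to_id lines out) := by unfold Spec_load_slot_value_to_id; infer_instance

-- ===== CLAIM (what is proved, stated in full; the proofs are below) =====
def Claim_equal_load_slot_value_to_id : Prop := ∀ (lines : List String), Dom_load_slot_value_to_id lines → Pre_load_slot_value_to_id lines → Spec_load_slot_value_to_id lines (load_slot_value_to_id lines)

-- ===== LEMMAS AND PROOFS =====

-- strip facts ------------------------------------------------------------
theorem pv_mem_dropWhile {p : Char → Bool} {c : Char} (hc : p c = false) :
    ∀ {l : List Char}, c ∈ l → c ∈ l.dropWhile p := by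
  intro l hm
  induction l with
  | nil => cases hm
  | cons a l ih =>
    by_cases ha : p a
    · rw [List.dropWhile_cons_of_pos ha]
      rcases List.mem_cons.mp hm with rfl | hm'
      · rw [ha] at hc; cases hc
      · exact ih hm'
    · rw [List.dropWhile_cons_of_neg ha]; exact hm

theorem pv_strip_ne_nil {c : Char} {cs : List Char} (hm : c ∈ cs)
    (hc : PySem.Chars.isspace c = false) : PySem.Chars.strip cs ≠ [] := by
  unfold PySem.Chars.strip PySem.Chars.rstrip PySem.Chars.lstrip
  intro h
  have h1 : c ∈ List.dropWhile PySem.Chars.isspace cs := pv_mem_dropWhile hc hm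
  have h2 : c ∈ List.dropWhile PySem.Chars.isspace (List.dropWhile PySem.Chars.isspace cs).reverse :=
    pv_mem_dropWhile hc (List.mem_reverse.mpr h1)
  rw [List.reverse_eq_nil_iff] at h
  rw [h] at h2
  cases h2

theorem pv_dropWhile_idem (p : Char → Bool) (l : List Char) :
    (l.dropWhile p).dropWhile p = l.dropWhile p := by
  simp
  intro hl
  have := List.head_dropWhile_not p (l := l) (by intro h; rw [h] at hl; simp at hl)
  rwa [List.head_eq_getElem] at this

theorem pv_strip_strip (cs : List Char) :
    PySem.Chars.strip (PySem.Chars.strip cs) = PySem.Chars.strip cs := by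
  unfold PySem.Chars.strip PySem.Chars.rstrip PySem.Chars.lstrip
  set p := PySem.Chars.isspace
  set t := List.dropWhile p cs with ht
  have hr : List.dropWhile p (List.dropWhile p t.reverse).reverse.reverse
      = List.dropWhile p t.reverse := by
    rw [List.reverse_reverse, pv_dropWhile_idem]
  have hl : List.dropWhile p (List.dropWhile p t.reverse).reverse
      = (List.dropWhile p t.reverse).reverse := by
    rcases h : (List.dropWhile p t.reverse).reverse with _ | ⟨a, u⟩
    · simp
    · have hpref : (a :: u) <+: t := by
        have hs : List.dropWhile p t.reverse <:+ t.reverse := List.dropWhile_suffix p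
        have h2 := List.reverse_prefix.mpr hs
        rw [List.reverse_reverse] at h2
        rwa [h] at h2
      obtain ⟨w, hw⟩ := hpref
      have hta : t = a :: (u ++ w) := by rw [← hw]; simp
      have ha : p a = false := by
        by_contra hpa
        have hpa' : p a = true := by simpa using hpa
        have hidem := pv_dropWhile_idem p cs
        rw [← ht] at hidem
        rw [hta, List.dropWhile_cons_of_pos hpa'] at hidem
        have hlen : (List.dropWhile p (u ++ w)).length = (u ++ w).length + 1 := by
          rw [hidem]; simp
        have hle := List.length_dropWhile_le p (u ++ w)
        omega
      rw [List.dropWhile_cons_of_neg (by simp [ha])]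
  rw [hl, hr]

-- find / splitOn on a single-character separator --------------------------
theorem pv_find_go (c : Char) : ∀ (l : List Char) (k : Nat),
    PySem.Chars.find.go [c] l k =
      if c ∈ l then ((k : Int) + (l.takeWhile (· ≠ c)).length) else -1 := by
  intro l
  induction l with
  | nil => intro k; simp [PySem.Chars.find.go, List.isEmpty]
  | cons a t ih =>
    intro k
    rw [PySem.Chars.find.go]
    by_cases hac : a = c
    · subst hac
      simp [List.isPrefixOf]
    · have hpre : ([c].isPrefixOf (a :: t)) = false := by
        simp [List.isPrefixOf]
        intro h; exact absurd h.symm hac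
      rw [hpre]
      simp only [if_neg (by simp : ¬false = true)]
      rw [ih (k+1)]
      have htw : (a :: t).takeWhile (· ≠ c) = a :: t.takeWhile (· ≠ c) := by
        rw [List.takeWhile_cons_of_pos (by simp [hac])]
      by_cases hm : c ∈ t
      · rw [if_pos hm, if_pos (by simp [hm])]
        rw [htw]
        simp
        ring
      · rw [if_neg hm, if_neg (by simp [hm, Ne.symm hac] )]

theorem pv_find_single (c : Char) (l : List Char) :
    PySem.Chars.find l [c] = if c ∈ l then ((l.takeWhile (· ≠ c)).length : Int) else -1 := by
  rw [PySem.Chars.find, pv_find_go]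
  simp

theorem pv_splitOn_go_acc (c : Char) : ∀ (fuel : Nat) (l cur : List Char) (acc : List (List Char)),
    PySem.Chars.splitOn.go [c] fuel l cur acc =
      acc.reverse ++ PySem.Chars.splitOn.go [c] fuel l cur [] := by
  intro fuel
  induction fuel with
  | zero => intro l cur acc; simp [PySem.Chars.splitOn.go]
  | succ f ih =>
    intro l cur acc
    cases l with
    | nil => simp [PySem.Chars.splitOn.go]
    | cons a t =>
      rw [PySem.Chars.splitOn.go, PySem.Chars.splitOn.go]
      by_cases h : [c].isPrefixOf (a :: t)
      · rw [if_pos h, if_pos h, ih _ _ (cur.reverse :: acc), ih _ _ [cur.reverse]]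
        simp
      · rw [if_neg h, if_neg h, ih _ _ acc]

theorem pv_splitOn_go_head (c : Char) : ∀ (l : List Char) (fuel : Nat) (cur : List Char),
    l.length < fuel →
      (PySem.Chars.splitOn.go [c] fuel l cur []).headD [] = cur.reverse ++ l.takeWhile (· ≠ c) := by
  intro l
  induction l with
  | nil =>
    intro fuel cur hf
    cases fuel with
    | zero => omega
    | succ f => simp [PySem.Chars.splitOn.go]
  | cons a t ih =>
    intro fuel cur hf
    cases fuel with
    | zero => omega
    | succ f =>
      rw [PySem.Chars.splitOn.go]
      by_cases hac : a = c
      · subst hac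
        rw [if_pos (by simp [List.isPrefixOf])]
        rw [pv_splitOn_go_acc]
        simp
      · rw [if_neg (by simp [List.isPrefixOf]; intro h; exact absurd h.symm hac)]
        rw [ih f (a :: cur) (by simpa using Nat.lt_of_succ_lt_succ hf)]
        rw [List.takeWhile_cons_of_pos (by simp [hac])]
        simp

theorem pv_splitOn_head (c : Char) (l : List Char) :
    (PySem.Chars.splitOn l [c]).headD [] = l.takeWhile (· ≠ c) := by
  rw [PySem.Chars.splitOn, pv_splitOn_go_head c l (l.length + 1) [] (by omega)]
  simp

-- tokenizer equivalence ---------------------------------------------------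
theorem pv_commaScan_acc (cs : List Char) : ∀ (cnt : Nat) (inq : Bool) (acc : List Int),
    pvCommaScanA cs cnt inq acc = acc ++ pvCommaScanA cs cnt inq [] := by
  have H : ∀ (fuel cnt : Nat), cs.length - cnt ≤ fuel → ∀ (inq : Bool) (acc : List Int),
      pvCommaScanA cs cnt inq acc = acc ++ pvCommaScanA cs cnt inq [] := by
    intro fuel
    induction fuel with
    | zero =>
      intro cnt h inq acc
      have hlt : ¬ cnt < cs.length := by omega
      simp [pvCommaScanA, hlt]
    | succ f ih =>
      intro cnt h inq acc
      by_cases hlt : cnt < cs.length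
      · conv_lhs => rw [pvCommaScanA]
        conv_rhs => rw [pvCommaScanA]
        simp only [dif_pos hlt]
        by_cases hcm : cs.getD cnt ' ' = ',' ∧
            (if cs.getD cnt ' ' = '"' ∧ (0 < cnt ∧ cs.getD (cnt - 1) ' ' = '='
                ∨ cnt + 1 < cs.length ∧ cs.getD (cnt + 1) ' ' = ','
                ∨ cnt + 1 = cs.length) then !inq else inq) = false
        · simp only [if_pos hcm]
          rw [ih (cnt+1) (by omega), ih (cnt+1) (by omega) _ ([] ++ [(cnt : Int)])]
          simp
        · simp only [if_neg hcm]
          exact ih (cnt+1) (by omega) _ _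
      · simp [pvCommaScanA, hlt]
  exact fun cnt => H (cs.length - cnt) cnt le_rfl

theorem pv_partScan_single (cs : List Char) (x : Int) (acc : List String) :
    pvPartScanA cs [x] acc = acc := rfl

theorem pv_partScan_cons (cs : List Char) (c1 c2 : Int) (rest : List Int) (acc : List String) :
    pvPartScanA cs (c1 :: c2 :: rest) acc =
      pvPartScanA cs (c2 :: rest)
        (if 0 < (PySem.Chars.strip (PySem.List.slice cs (some (c1 + 1)) (some c2))).length
          then acc ++ [String.ofList (PySem.Chars.strip (PySem.List.slice cs (some (c1 + 1)) (some c2)))]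
          else acc) := rfl

theorem pv_bridge_end (cs : List Char) (cnt : Nat) (inq : Bool) (prev : Int) (acc : List String)
    (h1 : -1 ≤ prev) (hlt : ¬ cnt < cs.length) :
    pvStreamScanB cs cnt inq (PySem.List.slice cs (some (prev + 1)) (some (cnt : Int))) acc =
      pvPartScanA cs (prev :: (pvCommaScanA cs cnt inq [] ++ [(cs.length : Int)])) acc := by
  rw [pvCommaScanA]
  simp only [dif_neg hlt, List.nil_append]
  rw [pvStreamScanB]
  simp only [dif_neg hlt]
  rw [pv_partScan_cons]
  have hs : PySem.List.slice cs (some (prev + 1)) (some (cnt : Int)) =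
      PySem.List.slice cs (some (prev + 1)) (some ((cs.length : Nat) : Int)) := by
    rw [PySem.List.slice_toNat cs (by omega) (by omega), PySem.List.slice_toNat cs (by omega) (by omega)]
    rw [List.take_of_length_le (by simp only [List.length_drop]; omega),
      List.take_of_length_le (by simp only [List.length_drop]; omega)]
  rw [hs, pv_partScan_single]

theorem pv_slice_snoc (cs : List Char) (prev : Int) (cnt : Nat) (h1 : -1 ≤ prev)
    (h2 : prev + 1 ≤ (cnt : Int)) (hlt : cnt < cs.length) :
    PySem.List.slice cs (some (prev + 1)) (some (cnt : Int)) ++ [cs.getD cnt ' '] =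
      PySem.List.slice cs (some (prev + 1)) (some ((cnt : Int) + 1)) := by
  rw [PySem.List.slice_toNat cs (by omega) (by omega), PySem.List.slice_toNat cs (by omega) (by omega)]
  have ha : (prev + 1).toNat ≤ cnt := by omega
  have h3 : ((cnt : Int) + 1).toNat = cnt + 1 := by omega
  have h4 : ((cnt : Int)).toNat = cnt := by omega
  rw [h3, h4]
  have h5 : cnt + 1 - (prev + 1).toNat = (cnt - (prev + 1).toNat) + 1 := by omega
  rw [h5, List.take_add_one]
  congr 1
  rw [List.getElem?_drop]
  have h6 : (prev + 1).toNat + (cnt - (prev + 1).toNat) = cnt := by omega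
  rw [h6]
  rw [List.getElem?_eq_getElem hlt]
  simp [List.getD, List.getElem?_eq_getElem hlt]

theorem pv_bridge (cs : List Char) : ∀ (cnt : Nat) (inq : Bool) (prev : Int) (acc : List String),
    -1 ≤ prev → prev + 1 ≤ (cnt : Int) →
    pvStreamScanB cs cnt inq (PySem.List.slice cs (some (prev + 1)) (some (cnt : Int))) acc =
      pvPartScanA cs (prev :: (pvCommaScanA cs cnt inq [] ++ [(cs.length : Int)])) acc := by
  have H : ∀ (fuel cnt : Nat), cs.length - cnt ≤ fuel → ∀ (inq : Bool) (prev : Int) (acc : List String),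
      -1 ≤ prev → prev + 1 ≤ (cnt : Int) →
      pvStreamScanB cs cnt inq (PySem.List.slice cs (some (prev + 1)) (some (cnt : Int))) acc =
        pvPartScanA cs (prev :: (pvCommaScanA cs cnt inq [] ++ [(cs.length : Int)])) acc := by
    intro fuel
    induction fuel with
    | zero =>
      intro cnt h inq prev acc h1 h2
      exact pv_bridge_end cs cnt inq prev acc h1 (by omega)
    | succ f ih =>
      intro cnt h inq prev acc h1 h2
      by_cases hlt : cnt < cs.length
      · conv_lhs => rw [pvStreamScanB]
        conv_rhs => rw [pvCommaScanA]
        simp only [dif_pos hlt, List.nil_append]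
        by_cases hcm : cs.getD cnt ' ' = ',' ∧
            (if cs.getD cnt ' ' = '"' ∧ (0 < cnt ∧ cs.getD (cnt - 1) ' ' = '='
                ∨ cnt + 1 < cs.length ∧ cs.getD (cnt + 1) ' ' = ','
                ∨ cnt + 1 = cs.length) then !inq else inq) = false
        · rw [if_pos hcm, if_pos hcm]
          rw [pv_commaScan_acc cs (cnt + 1)]
          simp only [List.nil_append, List.cons_append]
          rw [pv_partScan_cons]
          have hbuf : PySem.List.slice cs (some ((cnt : Int) + 1)) (some ((cnt + 1 : Nat) : Int)) = [] := by
            rw [PySem.List.slice_toNat cs (by omega) (by omega)]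
            have : ((cnt : Int) + 1).toNat = ((cnt + 1 : Nat) : Int).toNat := by omega
            simp [this]
          have := ih (cnt + 1) (by omega)
            (if cs.getD cnt ' ' = '"' ∧ (0 < cnt ∧ cs.getD (cnt - 1) ' ' = '='
                ∨ cnt + 1 < cs.length ∧ cs.getD (cnt + 1) ' ' = ','
                ∨ cnt + 1 = cs.length) then !inq else inq)
            ((cnt : Int))
            (if 0 < (PySem.Chars.strip (PySem.List.slice cs (some (prev + 1)) (some (cnt : Int)))).length
              then acc ++ [String.ofList (PySem.Chars.strip (PySem.List.slice cs (some (prev + 1)) (some (cnt : Int))))]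
              else acc)
            (by omega) (by push_cast; omega)
          rw [hbuf] at this
          exact this
        · rw [if_neg hcm, if_neg hcm]
          rw [pv_slice_snoc cs prev cnt h1 h2 hlt]
          have := ih (cnt + 1) (by omega)
            (if cs.getD cnt ' ' = '"' ∧ (0 < cnt ∧ cs.getD (cnt - 1) ' ' = '='
                ∨ cnt + 1 < cs.length ∧ cs.getD (cnt + 1) ' ' = ','
                ∨ cnt + 1 = cs.length) then !inq else inq)
            prev acc h1 (by push_cast; omega)
          have hc : ((cnt + 1 : Nat) : Int) = (cnt : Int) + 1 := by push_cast; ring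
          rw [hc] at this
          exact this
      · exact pv_bridge_end cs cnt inq prev acc h1 hlt
  exact fun cnt => H (cs.length - cnt) cnt le_rfl

theorem pv_split_eq (l : String) : pvSplitA (PySem.Str.strip l) = pvSplitB l := by
  unfold pvSplitA pvSplitB
  have hcs : PySem.Chars.strip ((PySem.Str.strip l).toList) = PySem.Chars.strip l.toList := by
    rw [PySem.Str.toList_strip]
    exact pv_strip_strip _
  rw [hcs]
  set cs := PySem.Chars.strip l.toList with hdef
  by_cases h0 : cs.length = 0
  · rw [if_pos h0]
    have hnil : cs = [] := List.length_eq_zero_iff.mp h0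
    rw [hnil, pvStreamScanB]
    simp [PySem.Chars.strip, PySem.Chars.lstrip, PySem.Chars.rstrip]
  · rw [if_neg h0]
    have hb := pv_bridge cs 0 false (-1) [] (by norm_num) (by norm_num)
    have hsl : PySem.List.slice cs (some ((-1 : Int) + 1)) (some ((0 : Nat) : Int)) = [] := by
      rw [PySem.List.slice_toNat cs (by norm_num) (by norm_num)]
      simp
    rw [hsl] at hb
    rw [pv_commaScan_acc cs 0 false [-1], hb]
    simp

-- inner / outer loop equivalence ------------------------------------------
theorem pv_addSv_eq (svp : PySem.Dict String Int) (sv : String) : pvAddSv svp sv = pvAddSvB svp sv := rfl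

theorem pv_take_find (tc : List Char) : tc.take ((tc.takeWhile (· ≠ '=')).length) = tc.takeWhile (· ≠ '=') :=
  (List.prefix_iff_eq_take.mp (List.takeWhile_prefix _)).symm

theorem pv_inner_eq : ∀ (ts : List String) (sa svp sios : PySem.Dict String Int),
    pvInnerA ts sa svp sios = pvInnerB ts sa svp sios := by
  intro ts
  induction ts with
  | nil => intro sa svp sios; rfl
  | cons t rest ih =>
    intro sa svp sios
    conv_lhs => rw [pvInnerA]
    conv_rhs => rw [pvInnerB]
    by_cases hf : PySem.Chars.find t.toList ['='] = -1
    · -- no '=' in the token: both skip (Python A and B raise ValueError; outside Pre_)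
      simp only [if_pos hf, ite_self]
      exact ih sa svp sios
    · -- the token contains '='
      have hm : '=' ∈ t.toList := by
        by_contra hm
        rw [pv_find_single, if_neg hm] at hf
        exact hf rfl
      have hk : PySem.Chars.find t.toList ['='] = ((t.toList.takeWhile (· ≠ '=')).length : Int) := by
        rw [pv_find_single, if_pos hm]
      have h0 : ¬ (PySem.Chars.strip t.toList).length = 0 := by
        intro h
        exact pv_strip_ne_nil hm (by decide) (List.length_eq_zero_iff.mp h)
      have hsl : PySem.List.slice t.toList none (some (PySem.Chars.find t.toList ['='])) =
          t.toList.takeWhile (· ≠ '=') := by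
        rw [hk, PySem.List.slice_to_natCast]
        exact pv_take_find t.toList
      have hsp : (PySem.Chars.splitOn t.toList ['=']).headD [] = t.toList.takeWhile (· ≠ '=') :=
        pv_splitOn_head '=' t.toList
      simp only [if_neg hf, if_neg h0, hsl, hsp, ne_eq, decide_not, pv_addSv_eq]
      by_cases hv : (PySem.Chars.strip (PySem.Chars.replace
          (PySem.Chars.strip (PySem.List.slice t.toList (some (PySem.Chars.find t.toList ['='] + 1)) none))
          ['\"'] [])).length = 0
      · rw [if_pos hv, if_pos hv]
        exact ih sa svp sios
      · rw [if_neg hv, if_neg hv]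
        by_cases hq : PySem.Chars.find
            ('{' :: (PySem.Chars.strip (t.toList.takeWhile (fun x => !decide (x = '='))) ++ ['}']))
            ['(', '@', 'C', ')'] = -1
        · rw [if_neg (by intro h; exact h hq)]
          rw [if_neg (by simp [PySem.Chars.isIn, hq])]
          cases hso : sios.get? (String.ofList
              ('{' :: (PySem.Chars.strip (t.toList.takeWhile (fun x => !decide (x = '='))) ++ ['}']))) with
          | none =>
            simp only [hso, PySem.Dict.getD, Option.getD_none]
            have h1 : PySem.Int.toChars (0 + 1) = ['1'] := by decide
            rw [h1]
            exact ih _ _ _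
          | some v =>
            simp only [hso, PySem.Dict.getD, Option.getD_some]
            exact ih _ _ _
        · rw [if_pos hq, if_pos (by simp [PySem.Chars.isIn, hq])]
          exact ih _ _ _

theorem pv_outer_eq : ∀ (ls : List String) (sa svp : PySem.Dict String Int),
    pvOuterA ls sa svp = pvOuterB ls sa svp := by
  intro ls
  induction ls with
  | nil => intro sa svp; rfl
  | cons l rest ih =>
    intro sa svp
    rw [pvOuterA, pvOuterB, pv_split_eq, pv_inner_eq, ih]

-- ===== VERDICT (by name: the statement is the Claim_ definition above) =====
theorem load_slot_value_to_id_spec : Claim_equal_load_slot_value_to_id := by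
  intro lines _ _
  unfold Spec_load_slot_value_to_id load_slot_value_to_id load_slot_value_to_id_alt
  rw [pv_outer_eq]
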